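-- pv_equiv track=rewrite | github.com/ndtands/ner_utils | ner_utils/ner_utils.py | convert_coll2span
-- ===== SOURCE A (Python) =====
-- def convert_coll2span(line):
--     out = []
--     tag = None
--     w_ = []
--     for w,t in line:
--         if t != 'O':
--             if tag == None:
--                 tag = t
--                 w_.append(w)
--             else:
--                 if tag != t:
--                     out.append((' '.join(w_),tag))
--                     w_ = [w]
--                     tag = t
--                 else:
--                     w_.append(w)
--         else:
--             if tag == None:
--                 out.append((w,t))
--                 tag = None
--             else:
--                 if tag != t:
--                     out.append((' '.join(w_),tag))
--                     out.append((w,t))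
--                     w_ = []
--                     tag = None
--                 # else:
--                 #     w_.append(w)
--     if tag == None:
--         pass
--     else:
--         out.append((' '.join(w_),tag))
--     return out
-- ===== SOURCE B (Python) =====
-- def convert_coll2span(line):
--     out = []
--     i, n = 0, len(line)
--     while i < n:
--         t = line[i][1]
--         j = i + 1
--         while j < n and line[j][1] == t:
--             j += 1
--         if t == 'O':
--             out.extend(line[i:j])
--         else:
--             out.append((' '.join(w for w, _ in line[i:j]), t))
--         i = j
--     return out
-- ===== Notes on version B (the rewrite author's own statement) =====
-- stated objective: alternative
-- what changed: B replaces A's flush-on-tag-change accumulator state machine (current tag + pending word buffer carried across the loop, flushed on changes and at the end) by a two-pointer run scanner: it finds each maximal run of equal tags with an inner index scan, then emits the run in one step ('O' runs token by token, other runs as one joined span).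
import Mathlib
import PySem

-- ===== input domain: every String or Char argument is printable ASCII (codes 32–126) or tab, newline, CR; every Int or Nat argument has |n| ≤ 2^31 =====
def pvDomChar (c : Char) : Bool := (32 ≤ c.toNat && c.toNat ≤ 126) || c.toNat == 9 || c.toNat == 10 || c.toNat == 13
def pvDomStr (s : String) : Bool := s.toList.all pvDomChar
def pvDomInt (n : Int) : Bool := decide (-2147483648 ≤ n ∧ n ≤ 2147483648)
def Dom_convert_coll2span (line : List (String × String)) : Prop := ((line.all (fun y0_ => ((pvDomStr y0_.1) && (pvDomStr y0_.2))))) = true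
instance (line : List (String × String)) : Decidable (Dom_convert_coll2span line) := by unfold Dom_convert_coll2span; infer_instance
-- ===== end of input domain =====

-- B replaces A's flush-on-tag-change accumulator state machine by a maximal-run scanner
-- (find each run of equal tags, then emit it in one step); same behaviour, same O(n) cost.

-- ===== PORT A =====
-- A's loop state: (out, tag, w_); tag = none ↔ Python's 'tag == None'.
def convA_step (st : List (String × String) × Option String × List String)
    (wt : String × String) : List (String × String) × Option String × List String :=
  let out := st.1
  let tag := st.2.1
  let w_ := st.2.2
  let w := wt.1
  let t := wt.2
  if t ≠ "O" then
    match tag with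
    | none => (out, some t, w_ ++ [w])
    | some tg =>
      if tg ≠ t then (out ++ [(PySem.Str.join " " w_, tg)], some t, [w])
      else (out, some tg, w_ ++ [w])
  else
    match tag with
    | none => (out ++ [(w, t)], none, w_)
    | some tg =>
      if tg ≠ t then (out ++ [(PySem.Str.join " " w_, tg), (w, t)], none, [])
      else (out, some tg, w_)

def convert_coll2span (line : List (String × String)) : List (String × String) :=
  let s := line.foldl convA_step ([], none, [])
  match s.2.1 with
  | none => s.1
  | some tg => s.1 ++ [(PySem.Str.join " " s.2.2, tg)]

-- ===== PORT B =====
-- B's inner 'while j < n and line[j][1] == t' scan = takeWhile/dropWhile on the tail;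
-- each iteration of B's outer while-loop is one unfolding of convB_go.
def convB_go : List (String × String) → List (String × String)
  | [] => []
  | (w, t) :: rest =>
    let run := rest.takeWhile (fun p => p.2 = t)
    let rem := rest.dropWhile (fun p => p.2 = t)
    (if t = "O" then (w, t) :: run
     else [(PySem.Str.join " " (w :: run.map Prod.fst), t)]) ++ convB_go rem
termination_by l => l.length
decreasing_by
  simpa using Nat.lt_succ_of_le (List.length_dropWhile_le _ _)

def convert_coll2span_alt (line : List (String × String)) : List (String × String) :=
  convB_go line

-- ===== PRECONDITION & SPEC =====
def Spec_convert_coll2span (line : List (String × String)) (out : List (String × String)) : Prop := out = convert_coll2span_alt line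
instance (line : List (String × String)) (out : List (String × String)) : Decidable (Spec_convert_coll2span line out) := by unfold Spec_convert_coll2span; infer_instance

-- ===== CLAIM (what is proved, stated in full; the proofs are below) =====
def Claim_equal_convert_coll2span : Prop := ∀ (line : List (String × String)), Dom_convert_coll2span line → Spec_convert_coll2span line (convert_coll2span line)

-- ===== LEMMAS AND PROOFS =====

theorem convB_nil : convB_go [] = [] := by rw [convB_go]

theorem convB_cons (w t : String) (rest : List (String × String)) :
    convB_go ((w, t) :: rest) =
      (if t = "O" then (w, t) :: rest.takeWhile (fun p => p.2 = t)
       else [(PySem.Str.join " " (w :: (rest.takeWhile (fun p => p.2 = t)).map Prod.fst), t)])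
        ++ convB_go (rest.dropWhile (fun p => p.2 = t)) := by
  rw [convB_go]

-- A's loop, reformulated as the suffix it still emits from state (tag, w_); the
-- final flush is folded in.
def loopA : List (String × String) → Option String → List String → List (String × String)
  | [], none, _ => []
  | [], some tg, w_ => [(PySem.Str.join " " w_, tg)]
  | (w, t) :: rest, tag, w_ =>
    if t ≠ "O" then
      match tag with
      | none => loopA rest (some t) (w_ ++ [w])
      | some tg =>
        if tg ≠ t then (PySem.Str.join " " w_, tg) :: loopA rest (some t) [w]
        else loopA rest (some tg) (w_ ++ [w])
    else
      match tag with
      | none => (w, t) :: loopA rest none w_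
      | some tg =>
        if tg ≠ t then (PySem.Str.join " " w_, tg) :: (w, t) :: loopA rest none []
        else loopA rest (some tg) w_

theorem foldA_eq_loopA (line : List (String × String)) :
    ∀ (out : List (String × String)) (tag : Option String) (w_ : List String),
    (match (line.foldl convA_step (out, tag, w_)).2.1 with
     | none => (line.foldl convA_step (out, tag, w_)).1
     | some tg => (line.foldl convA_step (out, tag, w_)).1 ++
         [(PySem.Str.join " " (line.foldl convA_step (out, tag, w_)).2.2, tg)])
      = out ++ loopA line tag w_ := by
  induction line with
  | nil =>
    intro out tag w_
    cases tag <;> simp [loopA]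
  | cons wt rest ih =>
    intro out tag w_
    obtain ⟨w, t⟩ := wt
    by_cases ht : t = "O"
    · subst ht
      cases tag with
      | none => simp [convA_step, loopA, ih]
      | some tg =>
        by_cases htg : tg = "O"
        · subst htg; simp [convA_step, loopA, ih]
        · simp [convA_step, loopA, htg, ih]
    · cases tag with
      | none => simp [convA_step, loopA, ht, ih]
      | some tg =>
        by_cases htg : tg = t
        · subst htg; simp [convA_step, loopA, ht, ih]
        · simp [convA_step, loopA, ht, htg, ih]

-- Emitting an 'O' token commutes with B's run grouping.
theorem convB_O_cons (w : String) (rest : List (String × String)) :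
    convB_go ((w, "O") :: rest) = (w, "O") :: convB_go rest := by
  rw [convB_cons]
  cases rest with
  | nil => simp
  | cons p rs =>
    obtain ⟨w', t'⟩ := p
    by_cases ht' : t' = "O"
    · subst ht'
      rw [convB_cons]
      simp
    · simp [ht']

-- The core correspondence: from the 'no open span' state A emits exactly B's output,
-- and from an open span (tg, ws) it first closes the maximal run of tg and continues as B.
theorem loopA_eq_convB (line : List (String × String)) :
    (loopA line none [] = convB_go line) ∧
    (∀ tg ws, tg ≠ "O" →
      loopA line (some tg) ws =
        (PySem.Str.join " " (ws ++ (line.takeWhile (fun p => p.2 = tg)).map Prod.fst), tg)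
          :: convB_go (line.dropWhile (fun p => p.2 = tg))) := by
  induction line with
  | nil =>
    constructor
    · simp [loopA, convB_nil]
    · intro tg ws _
      simp [loopA, convB_nil]
  | cons wt rest ih =>
    obtain ⟨w, t⟩ := wt
    obtain ⟨ihn, iho⟩ := ih
    by_cases ht : t = "O"
    · subst ht
      constructor
      · -- none state, head is 'O': emit (w,O), continue in none state
        rw [convB_O_cons]
        simp only [loopA, if_neg (by simp : ¬("O" : String) ≠ "O")]
        rw [ihn]
      · intro tg ws htg
        simp only [loopA, if_neg (by simp : ¬("O" : String) ≠ "O"),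
          if_pos (by simpa using htg)]
        rw [ihn]
        simp [Ne.symm htg, convB_O_cons]
    · constructor
      · -- none state, head t ≠ 'O': open span (t, [w])
        simp only [loopA, if_pos (by simpa using ht)]
        rw [show ([] : List String) ++ [w] = [w] from rfl, iho t [w] ht, convB_cons]
        simp [ht]
      · intro tg ws htg
        by_cases htgt : tg = t
        · subst htgt
          simp only [loopA, if_pos (by simpa using ht),
            if_neg (show ¬(tg ≠ tg) by simp)]
          rw [iho tg (ws ++ [w]) htg]
          simp
        · simp only [loopA, if_pos (by simpa using ht), if_pos (by simpa using htgt)]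
          rw [iho t [w] ht]
          simp only [List.takeWhile_cons, List.dropWhile_cons,
            decide_eq_true_eq]
          rw [if_neg (fun h => htgt h.symm), if_neg (fun h => htgt h.symm), convB_cons]
          simp [ht]

-- ===== VERDICT (by name: the statement is the Claim_ definition above) =====
theorem convert_coll2span_spec : Claim_equal_convert_coll2span := by
  intro line _
  unfold Spec_convert_coll2span convert_coll2span convert_coll2span_alt
  have h := foldA_eq_loopA line [] none []
  simp only [List.nil_append] at h
  rw [h, (loopA_eq_convB line).1]
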